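-- pv_equiv track=rewrite | github.com/emily-ross/CIBSR2016 | binary_blur.py | blur_array
-- ===== SOURCE A (Python) =====
-- def blur_array(raw_input, pre_blur, post_blur):
--     output = []
--
--     for idx in range(len(raw_input)):
--         window_start = idx - post_blur
--         window_end = idx + pre_blur + 1
--         if window_start < 0: window_start = 0
--         if window_end > len(raw_input): window_end = len(raw_input)
--         output += [any(raw_input[window_start:window_end])]
--     return output
-- ===== SOURCE B (Python) =====
-- def blur_array(raw_input, pre_blur, post_blur):
--     n = len(raw_input)
--     prefix = [0]
--     acc = 0
--     for v in raw_input: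
--         acc += 1 if v else 0
--         prefix.append(acc)
--     out = []
--     for idx in range(n):
--         s = min(max(idx - post_blur, 0), n)
--         e = min(max(idx + pre_blur + 1, 0), n)
--         out.append(prefix[e] > prefix[s])
--     return out
-- ===== Notes on version B (the rewrite author's own statement) =====
-- stated objective: faster
-- what changed: B builds a prefix count of truthy elements once and answers each index by comparing two prefix values, instead of A's re-slicing and re-scanning a window per index.
-- intended difference: When pre_blur is so negative that some window end idx+pre_blur+1 is below 0 and the list has a truthy element in the wrapped tail region, A's slice raw_input[start:negative_end] wraps the end to the tail and reports True at that index, while B returns False for such an empty (end-before-start) window, which is the intended meaning. — e.g. on blur_array([true, true], -3, 5): A returns [false, true], B returns [false, false]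
import Mathlib
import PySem

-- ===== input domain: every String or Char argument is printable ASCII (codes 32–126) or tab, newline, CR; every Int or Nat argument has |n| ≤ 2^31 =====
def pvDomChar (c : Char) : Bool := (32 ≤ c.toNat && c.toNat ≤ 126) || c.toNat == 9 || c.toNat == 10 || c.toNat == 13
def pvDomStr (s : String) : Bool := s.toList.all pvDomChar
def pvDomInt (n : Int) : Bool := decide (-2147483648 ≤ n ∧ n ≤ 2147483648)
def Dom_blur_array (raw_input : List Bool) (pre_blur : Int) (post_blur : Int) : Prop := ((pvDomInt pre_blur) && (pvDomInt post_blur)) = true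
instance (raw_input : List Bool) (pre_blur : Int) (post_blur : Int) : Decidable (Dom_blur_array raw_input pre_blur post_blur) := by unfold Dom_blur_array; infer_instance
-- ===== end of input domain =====

-- B replaces the per-index window re-scan (any over a fresh slice) by one prefix-count pass
-- and an O(1) comparison per index: O(n·w) → O(n).

-- ===== PORT A =====
-- loop body of A: compute the clamped window and take `any` of the slice
def aBody (raw_input : List Bool) (pre_blur post_blur idx : Int) : Bool :=
  let window_start := idx - post_blur
  let window_end := idx + pre_blur + 1
  let window_start := if window_start < 0 then 0 else window_start
  let window_end := if window_end > PySem.List.len raw_input then PySem.List.len raw_input else window_end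
  (PySem.List.slice raw_input (some window_start) (some window_end)).any id

def blur_array (raw_input : List Bool) (pre_blur : Int) (post_blur : Int) : List Bool :=
  (PySem.List.pyRange 0 (PySem.List.len raw_input) 1).foldl
    (fun output idx => output ++ [aBody raw_input pre_blur post_blur idx]) []

-- ===== PORT B =====
-- prefix[k] = number of truthy elements among the first k, built in one pass
def blurPrefix (raw_input : List Bool) : List Int :=
  (raw_input.foldl
    (fun st v => (st.1 ++ [st.2 + (if v then 1 else 0)], st.2 + (if v then 1 else 0)))
    ([0], 0)).1

-- loop body of B: clamp both window ends into [0, n] and compare two prefix counts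
def bBody (pfx : List Int) (n pre_blur post_blur idx : Int) : Bool :=
  let s := min (max (idx - post_blur) 0) n
  let e := min (max (idx + pre_blur + 1) 0) n
  decide (PySem.List.pyGetD pfx e 0 > PySem.List.pyGetD pfx s 0)

def blur_array_alt (raw_input : List Bool) (pre_blur : Int) (post_blur : Int) : List Bool :=
  let n : Int := raw_input.length
  let pfx := blurPrefix raw_input
  (PySem.List.pyRange 0 n 1).foldl
    (fun out idx => out ++ [bBody pfx n pre_blur post_blur idx]) []

-- ===== PRECONDITION & SPEC =====
-- When pre_blur is so negative that some window end idx+pre_blur+1 is < 0, A's Python slice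
-- raw_input[start:negative_end] silently wraps the end to the tail of the list and can report True
-- from elements far right of idx; B returns False there (an empty window), which is the intended
-- meaning of a window that ends before it starts.
def D_blur_array (raw_input : List Bool) (pre_blur : Int) (post_blur : Int) : Prop :=
  ∃ k, k < min raw_input.length (-pre_blur - 1).toNat ∧
    true ∈ (raw_input.take (↑raw_input.length + ↑k + pre_blur + 1).toNat).drop
      (↑k - post_blur).toNat

instance (raw_input : List Bool) (pre_blur : Int) (post_blur : Int) : Decidable (D_blur_array raw_input pre_blur post_blur) := by
  unfold D_blur_array; infer_instance

def Spec_blur_array (raw_input : List Bool) (pre_blur : Int) (post_blur : Int) (out : List Bool) : Prop :=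
  ¬ D_blur_array raw_input pre_blur post_blur → out = blur_array_alt raw_input pre_blur post_blur
instance (raw_input : List Bool) (pre_blur : Int) (post_blur : Int) (out : List Bool) : Decidable (Spec_blur_array raw_input pre_blur post_blur out) := by unfold Spec_blur_array; infer_instance

def pvDiffWitness_blur_array : List Bool × Int × Int := ([true, true], -3, 5)
def pvDiffWitnessOut_blur_array : (List Bool) × (List Bool) := ([false, true], [false, false])

-- ===== CLAIM (what is proved, stated in full; the proofs are below) =====
def Claim_unchanged_blur_array : Prop := ∀ (raw_input : List Bool) (pre_blur : Int) (post_blur : Int), Dom_blur_array raw_input pre_blur post_blur → Spec_blur_array raw_input pre_blur post_blur (blur_array raw_input pre_blur post_blur)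
def Claim_changed_blur_array : Prop := Dom_blur_array (pvDiffWitness_blur_array.1) (pvDiffWitness_blur_array.2.1) (pvDiffWitness_blur_array.2.2) ∧ D_blur_array (pvDiffWitness_blur_array.1) (pvDiffWitness_blur_array.2.1) (pvDiffWitness_blur_array.2.2) ∧ blur_array (pvDiffWitness_blur_array.1) (pvDiffWitness_blur_array.2.1) (pvDiffWitness_blur_array.2.2) = pvDiffWitnessOut_blur_array.1 ∧ blur_array_alt (pvDiffWitness_blur_array.1) (pvDiffWitness_blur_array.2.1) (pvDiffWitness_blur_array.2.2) = pvDiffWitnessOut_blur_array.2 ∧ pvDiffWitnessOut_blur_array.1 ≠ pvDiffWitnessOut_blur_array.2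
def Claim_exact_blur_array : Prop := ∀ (raw_input : List Bool) (pre_blur : Int) (post_blur : Int), Dom_blur_array raw_input pre_blur post_blur → D_blur_array raw_input pre_blur post_blur → blur_array raw_input pre_blur post_blur ≠ blur_array_alt raw_input pre_blur post_blur

-- ===== LEMMAS AND PROOFS =====

-- number of `true` among the first k elements
def pcount (raw : List Bool) (k : Nat) : Nat := (raw.take k).count true

theorem pcount_min (raw : List Bool) (k : Nat) :
    pcount raw (min k raw.length) = pcount raw k := by
  unfold pcount
  rcases Nat.lt_or_ge raw.length k with h | h
  · rw [Nat.min_eq_right (Nat.le_of_lt h), List.take_length,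
        List.take_of_length_le (Nat.le_of_lt h)]
  · rw [Nat.min_eq_left h]

theorem pcount_mono (raw : List Bool) {a b : Nat} (h : a ≤ b) :
    pcount raw a ≤ pcount raw b := by
  unfold pcount
  have hsub : raw.take a = (raw.take b).take a := by
    rw [List.take_take, Nat.min_eq_left h]
  rw [hsub]
  exact ((raw.take b).take_sublist a).count_le true

theorem blurPrefix_pair (raw : List Bool) :
    raw.foldl
      (fun st v => (st.1 ++ [st.2 + (if v then 1 else 0)], st.2 + (if v then 1 else 0)))
      (([0] : List Int), (0 : Int))
    = ((List.range (raw.length + 1)).map (fun k => (pcount raw k : Int)),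
       ((raw.count true : Nat) : Int)) := by
  induction raw using List.reverseRecOn with
  | nil => simp [pcount]
  | append_singleton xs x ih =>
    have hcnt : (((xs ++ [x]).count true : Nat) : Int)
        = ((xs.count true : Nat) : Int) + (if x = true then 1 else 0) := by
      rw [List.count_append]
      cases x <;> simp
    have hfst : (List.range (xs.length + 1)).map (fun k => (pcount xs k : Int))
          ++ [((xs.count true : Nat) : Int) + (if x = true then 1 else 0)]
        = (List.range (xs.length + 1 + 1)).map (fun k => (pcount (xs ++ [x]) k : Int)) := by
      rw [List.range_succ (n := xs.length + 1), List.map_append]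
      congr 1
      · refine List.map_congr_left (fun k hk => ?_)
        have hk' : k ≤ xs.length := by
          simpa [Nat.lt_succ_iff] using List.mem_range.mp hk
        unfold pcount
        rw [List.take_append_of_le_length hk']
      · have hp : pcount (xs ++ [x]) (xs.length + 1) = (xs ++ [x]).count true := by
          unfold pcount
          rw [List.take_of_length_le (by simp)]
        simp only [List.map_cons, List.map_nil, hp, hcnt]
    rw [List.foldl_append, ih]
    simp only [List.foldl_cons, List.foldl_nil]
    refine Prod.ext ?_ ?_
    · show (List.range (xs.length + 1)).map (fun k => (pcount xs k : Int))
          ++ [((xs.count true : Nat) : Int) + (if x = true then 1 else 0)]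
        = (List.range ((xs ++ [x]).length + 1)).map (fun k => (pcount (xs ++ [x]) k : Int))
      rw [show (xs ++ [x]).length = xs.length + 1 by simp]
      exact hfst
    · show ((xs.count true : Nat) : Int) + (if x = true then 1 else 0)
        = (((xs ++ [x]).count true : Nat) : Int)
      exact hcnt.symm

theorem blurPrefix_spec (raw : List Bool) :
    blurPrefix raw = (List.range (raw.length + 1)).map (fun k => (pcount raw k : Int)) := by
  unfold blurPrefix
  rw [blurPrefix_pair]

theorem blurPrefix_get (raw : List Bool) (i : Int) (h0 : 0 ≤ i) (h1 : i ≤ (raw.length : Int)) :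
    PySem.List.pyGetD (blurPrefix raw) i 0 = (pcount raw i.toNat : Int) := by
  rw [blurPrefix_spec]
  have hlen : ((List.range (raw.length + 1)).map (fun k => (pcount raw k : Int))).length
      = raw.length + 1 := by simp
  have hlt : i < (((List.range (raw.length + 1)).map (fun k => (pcount raw k : Int))).length : Int) := by
    rw [hlen]; push_cast; omega
  rw [PySem.List.pyGetD_eq_getElem (h0 := h0) (h1 := hlt)]
  have hi : i.toNat < raw.length + 1 := by omega
  simp

theorem any_drop_take (raw : List Bool) (lo hi : Nat) :
    ((raw.drop lo).take (hi - lo)).any id = decide (pcount raw lo < pcount raw hi) := by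
  rcases Nat.lt_or_ge hi lo with h | h
  · have hle : pcount raw hi ≤ pcount raw lo := pcount_mono raw (Nat.le_of_lt h)
    rw [Nat.sub_eq_zero_of_le (Nat.le_of_lt h)]
    simp only [List.take_zero, List.any_nil]
    symm
    exact decide_eq_false (by omega)
  · have htake : raw.take hi = raw.take lo ++ (raw.drop lo).take (hi - lo) := by
      conv_lhs => rw [show hi = lo + (hi - lo) by omega]
      exact List.take_add
    have hc : pcount raw hi = pcount raw lo + ((raw.drop lo).take (hi - lo)).count true := by
      unfold pcount
      rw [htake, List.count_append]
    have hiff : (((raw.drop lo).take (hi - lo)).any id = true)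
        ↔ (pcount raw lo < pcount raw hi) := by
      rw [List.any_eq_true]
      constructor
      · rintro ⟨x, hx, hid⟩
        have hxt : x = true := by simpa using hid
        subst hxt
        have : 0 < ((raw.drop lo).take (hi - lo)).count true :=
          List.count_pos_iff.mpr hx
        omega
      · intro hlt
        have : 0 < ((raw.drop lo).take (hi - lo)).count true := by omega
        exact ⟨true, List.count_pos_iff.mp this, rfl⟩
    cases hA : ((raw.drop lo).take (hi - lo)).any id
    · symm; exact decide_eq_false (fun hc' => by simp [hA] at hiff; omega)
    · symm; exact decide_eq_true (hiff.mp hA)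

theorem index_of_pcount_lt (raw : List Bool) {lo hi : Nat} (h : pcount raw lo < pcount raw hi) :
    ∃ j, j < raw.length ∧ lo ≤ j ∧ j < hi ∧ raw.getD j false = true := by
  have hany : ((raw.drop lo).take (hi - lo)).any id = true := by
    rw [any_drop_take]; exact decide_eq_true h
  rw [List.any_eq_true] at hany
  obtain ⟨x, hx, hid⟩ := hany
  have hxt : x = true := by simpa using hid
  subst hxt
  obtain ⟨m, hm, hget⟩ := List.getElem_of_mem hx
  have hm1 : m < hi - lo := by
    have := hm
    simp only [List.length_take, List.length_drop, lt_min_iff] at this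
    omega
  have hm2 : m < raw.length - lo := by
    have := hm
    simp only [List.length_take, List.length_drop, lt_min_iff] at this
    omega
  have hraw : raw[lo + m]'(by omega) = true := by
    rw [← hget]
    simp [List.getElem_take, List.getElem_drop]
  refine ⟨lo + m, by omega, by omega, by omega, ?_⟩
  rw [List.getD_eq_getElem raw false (by omega)]
  exact hraw

theorem pcount_lt_of_index (raw : List Bool) {lo hi j : Nat} (hj : j < raw.length)
    (h1 : lo ≤ j) (h2 : j < hi) (ht : raw.getD j false = true) :
    pcount raw lo < pcount raw hi := by
  have hgetj : raw[j]'hj = true := by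
    rw [List.getD_eq_getElem raw false hj] at ht
    exact ht
  have hsucc : pcount raw (j + 1) = pcount raw j + 1 := by
    unfold pcount
    rw [List.take_add_one, List.count_append, List.getElem?_eq_getElem hj, hgetj]
    simp
  have hlo : pcount raw lo ≤ pcount raw j := pcount_mono raw h1
  have hhi : pcount raw (j + 1) ≤ pcount raw hi := pcount_mono raw (by omega)
  omega

theorem blur_array_eq_map (raw : List Bool) (pre post : Int) :
    blur_array raw pre post =
      (PySem.List.pyRange 0 (raw.length : Int) 1).map (aBody raw pre post) := by
  unfold blur_array
  rw [PySem.List.foldl_append_singleton_eq_map]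
  simp [PySem.List.len_eq]

theorem blur_array_alt_eq_map (raw : List Bool) (pre post : Int) :
    blur_array_alt raw pre post =
      (PySem.List.pyRange 0 (raw.length : Int) 1).map
        (bBody (blurPrefix raw) (raw.length : Int) pre post) := by
  unfold blur_array_alt
  rw [PySem.List.foldl_append_singleton_eq_map]
  simp

theorem Dmem_iff (raw : List Bool) (pre post : Int) (k : Nat) :
    (true ∈ (raw.take ((raw.length : Int) + (k : Int) + pre + 1).toNat).drop
        ((k : Int) - post).toNat)
      ↔ ∃ j, j < raw.length ∧ max ((k : Int) - post) 0 ≤ (j : Int) ∧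
          (j : Int) < (raw.length : Int) + ((k : Int) + pre + 1) ∧
          raw.getD j false = true := by
  rw [List.drop_take]
  have hmem : true ∈ (raw.drop ((k : Int) - post).toNat).take
        (((raw.length : Int) + (k : Int) + pre + 1).toNat - ((k : Int) - post).toNat)
      ↔ ((raw.drop ((k : Int) - post).toNat).take
        (((raw.length : Int) + (k : Int) + pre + 1).toNat - ((k : Int) - post).toNat)).any id = true := by
    rw [List.any_eq_true]
    constructor
    · intro h; exact ⟨true, h, rfl⟩
    · rintro ⟨x, hx, hid⟩
      have : x = true := by simpa using hid
      subst this; exact hx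
  rw [hmem, any_drop_take, decide_eq_true_iff]
  constructor
  · intro h
    obtain ⟨j, hjn, hjlo, hjhi, hjt⟩ := index_of_pcount_lt raw h
    exact ⟨j, hjn, by omega, by omega, hjt⟩
  · rintro ⟨j, hjn, hjlo, hjhi, hjt⟩
    exact pcount_lt_of_index raw hjn (by omega) (by omega) hjt


theorem D_iff (raw : List Bool) (pre post : Int) :
    D_blur_array raw pre post ↔
      ∃ k, k < raw.length ∧ (k : Int) + pre + 1 < 0 ∧
        ∃ j, j < raw.length ∧ max ((k : Int) - post) 0 ≤ (j : Int) ∧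
          (j : Int) < (raw.length : Int) + ((k : Int) + pre + 1) ∧
          raw.getD j false = true := by
  unfold D_blur_array
  have hb : ∀ k : Nat, (k < min raw.length (-pre - 1).toNat)
      ↔ (k < raw.length ∧ (k : Int) + pre + 1 < 0) := by
    intro k; omega
  constructor
  · rintro ⟨k, hk, hmem⟩
    obtain ⟨hk1, hk2⟩ := (hb k).mp hk
    exact ⟨k, hk1, hk2, (Dmem_iff raw pre post k).mp hmem⟩
  · rintro ⟨k, hk1, hk2, j, hj⟩
    exact ⟨k, (hb k).mpr ⟨hk1, hk2⟩, (Dmem_iff raw pre post k).mpr ⟨j, hj⟩⟩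

theorem bBody_neg (raw : List Bool) (pre post idx : Int)
    (hwe : idx + pre + 1 < 0) :
    bBody (blurPrefix raw) (raw.length : Int) pre post idx = false := by
  simp only [bBody]
  have hN : (0 : Int) ≤ (raw.length : Int) := by positivity
  have he : min (max (idx + pre + 1) 0) (raw.length : Int) = 0 := by omega
  have hs0 : (0 : Int) ≤ min (max (idx - post) 0) (raw.length : Int) := by omega
  have hs1 : min (max (idx - post) 0) (raw.length : Int) ≤ (raw.length : Int) := by omega
  rw [he, blurPrefix_get raw 0 le_rfl hN, blurPrefix_get raw _ hs0 hs1]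
  have hp : (0 : Int) ≤ (pcount raw (min (max (idx - post) 0) (raw.length : Int)).toNat : Int) := by
    positivity
  have h0' : pcount raw (0 : Int).toNat = 0 := by simp [pcount]
  rw [h0']
  exact decide_eq_false (by push_cast; omega)

theorem aBody_pos_eq (raw : List Bool) (pre post idx : Int)
    (hwe : 0 ≤ idx + pre + 1) :
    aBody raw pre post idx = bBody (blurPrefix raw) (raw.length : Int) pre post idx := by
  simp only [aBody, bBody, PySem.List.len_eq]
  have hN : (0 : Int) ≤ (raw.length : Int) := by positivity
  have hifs : (if idx - post < 0 then 0 else idx - post) = max (idx - post) 0 := by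
    split <;> omega
  have hife : (if idx + pre + 1 > (raw.length : Int) then (raw.length : Int) else idx + pre + 1)
      = min (idx + pre + 1) (raw.length : Int) := by
    split <;> omega
  rw [hifs, hife]
  have ha : (0 : Int) ≤ max (idx - post) 0 := by omega
  have hb : (0 : Int) ≤ min (idx + pre + 1) (raw.length : Int) := by omega
  rw [PySem.List.slice_toNat raw (ha := ha) (hb := hb)]
  rw [any_drop_take]
  have hmax : max (idx + pre + 1) 0 = idx + pre + 1 := by omega
  rw [hmax]
  have hs0 : (0 : Int) ≤ min (max (idx - post) 0) (raw.length : Int) := by omega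
  have hs1 : min (max (idx - post) 0) (raw.length : Int) ≤ (raw.length : Int) := by omega
  have he0 : (0 : Int) ≤ min (idx + pre + 1) (raw.length : Int) := hb
  have he1 : min (idx + pre + 1) (raw.length : Int) ≤ (raw.length : Int) := by omega
  rw [blurPrefix_get raw _ he0 he1, blurPrefix_get raw _ hs0 hs1]
  have hsnat : (min (max (idx - post) 0) (raw.length : Int)).toNat
      = min (max (idx - post) 0).toNat raw.length := by omega
  rw [hsnat, pcount_min]
  rw [decide_eq_decide]
  constructor
  · intro h; exact_mod_cast h
  · intro h; exact_mod_cast h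

theorem aBody_neg_iff (raw : List Bool) (pre post idx : Int) (h0 : 0 ≤ idx)
    (h1 : idx < (raw.length : Int)) (hwe : idx + pre + 1 < 0) :
    aBody raw pre post idx = true ↔
      ∃ j, j < raw.length ∧ max (idx - post) 0 ≤ (j : Int) ∧
        (j : Int) < (raw.length : Int) + (idx + pre + 1) ∧ raw.getD j false = true := by
  simp only [aBody, PySem.List.len_eq]
  have hN : (0 : Int) ≤ (raw.length : Int) := by positivity
  have hifs : (if idx - post < 0 then 0 else idx - post) = max (idx - post) 0 := by
    split <;> omega
  have hife : (if idx + pre + 1 > (raw.length : Int) then (raw.length : Int) else idx + pre + 1)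
      = idx + pre + 1 := by
    split <;> omega
  rw [hifs, hife]
  have hslice : PySem.List.slice raw (some (max (idx - post) 0)) (some (idx + pre + 1))
      = (raw.drop (PySem.List.clampIdx raw.length (max (idx - post) 0))).take
          (PySem.List.clampIdx raw.length (idx + pre + 1)
            - PySem.List.clampIdx raw.length (max (idx - post) 0)) := by
    simp [PySem.List.slice]
  rw [hslice]
  set w : Int := max (idx - post) 0 with hw
  have hw0 : (0 : Int) ≤ w := by omega
  have hlo : PySem.List.clampIdx raw.length w = min w.toNat raw.length := by
    simp only [PySem.List.clampIdx]
    split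
    · omega
    · rfl
  have hhi : (PySem.List.clampIdx raw.length (idx + pre + 1) : Nat)
      = ((raw.length : Int) + (idx + pre + 1)).toNat := by
    simp only [PySem.List.clampIdx]
    split
    · split <;> omega
    · omega
  rw [hlo, hhi, any_drop_take, decide_eq_true_iff]
  constructor
  · intro h
    obtain ⟨j, hjn, hjlo, hjhi, hjt⟩ := index_of_pcount_lt raw h
    refine ⟨j, hjn, by omega, by omega, hjt⟩
  · rintro ⟨j, hjn, hjlo, hjhi, hjt⟩
    exact pcount_lt_of_index raw hjn (by omega) (by omega) hjt

-- ===== VERDICT (by name: the statement is the Claim_ definition above) =====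
theorem blur_array_spec : Claim_unchanged_blur_array := by
  intro raw pre post _ hnd
  rw [blur_array_eq_map, blur_array_alt_eq_map]
  refine List.map_congr_left (fun idx hmem => ?_)
  obtain ⟨hidx0, hidx1⟩ := (PySem.List.mem_pyRange_one).mp hmem
  rcases Int.lt_or_le (idx + pre + 1) 0 with hwe | hwe
  · rw [bBody_neg raw pre post idx hwe]
    cases hA : aBody raw pre post idx
    · rfl
    · exfalso
      obtain ⟨j, hjn, hjlo, hjhi, hjt⟩ :=
        (aBody_neg_iff raw pre post idx hidx0 hidx1 hwe).mp hA
      refine hnd ((D_iff raw pre post).mpr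
        ⟨idx.toNat, by omega, by omega, j, hjn, ?_, ?_, hjt⟩)
      · rw [Int.toNat_of_nonneg hidx0]; exact hjlo
      · rw [Int.toNat_of_nonneg hidx0]; exact hjhi
  · exact aBody_pos_eq raw pre post idx hwe

theorem blur_array_changed : Claim_changed_blur_array := by
  unfold Claim_changed_blur_array; decide

theorem blur_array_tight : Claim_exact_blur_array := by
  intro raw pre post _ hd heq
  obtain ⟨k, hk, hwe, j, hjn, hjlo, hjhi, hjt⟩ := (D_iff raw pre post).mp hd
  rw [blur_array_eq_map, blur_array_alt_eq_map] at heq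
  have hmem : (k : Int) ∈ PySem.List.pyRange 0 (raw.length : Int) 1 :=
    (PySem.List.mem_pyRange_one).mpr ⟨by omega, by omega⟩
  have hpt := List.map_inj_left.mp heq (k : Int) hmem
  rw [bBody_neg raw pre post (k : Int) hwe] at hpt
  have hA : aBody raw pre post (k : Int) = true :=
    (aBody_neg_iff raw pre post (k : Int) (by omega) (by omega) hwe).mpr
      ⟨j, hjn, hjlo, hjhi, hjt⟩
  rw [hA] at hpt
  simp at hpt
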